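-- pv_equiv track=rewrite | github.com/MCEVAL/MMCoder | build_data/diagram/render_diagram.py | parse_problem_solution
-- ===== SOURCE A (Python) =====
-- def parse_problem_solution(response_text: str) -> tuple[str, str] | None:
--     lines = response_text.splitlines(keepends=True)
--     problem_start_index: int | None = None
--     solution_start_index: int | None = None
--     for idx, line in enumerate(lines):
--         if "[incomplete problem]" in line.lower() and problem_start_index is None:
--             problem_start_index = idx
--         if "[solution]" in line.lower() and solution_start_index is None:
--             solution_start_index = idx
--     if problem_start_index is None or solution_start_index is None:
--         return None, None
--     if problem_start_index >= solution_start_index: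
--         return None, None
--     problem = "".join(lines[problem_start_index + 1 : solution_start_index]).strip()
--     solution = "".join(lines[solution_start_index + 1 :]).strip()
--     return problem, solution
-- ===== SOURCE B (Python) =====
-- def parse_problem_solution(response_text: str) -> tuple[str, str] | None:
--     lines = iter(response_text.splitlines(keepends=True))
--     # phase 1: find the problem marker; any solution marker seen first (or on
--     # the same line) makes the layout invalid.
--     for line in lines:
--         low = line.lower()
--         if "[solution]" in low:
--             return None, None
--         if "[incomplete problem]" in low:
--             break
--     else:
--         return None, None
--     # phase 2: collect problem lines until the solution marker; the rest of
--     # the iterator is the solution.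
--     problem = []
--     for line in lines:
--         if "[solution]" in line.lower():
--             return "".join(problem).strip(), "".join(lines).strip()
--         problem.append(line)
--     return None, None
-- ===== Notes on version B (the rewrite author's own statement) =====
-- stated objective: simpler
-- what changed: Replaces A's enumerate-all-lines pass that records two first-marker indices followed by two slice-and-join steps with a single forward state-machine pass: find the problem marker (failing if a solution marker comes first or on the same line), then buffer problem lines until the solution marker, the rest being the solution.
import Mathlib
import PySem

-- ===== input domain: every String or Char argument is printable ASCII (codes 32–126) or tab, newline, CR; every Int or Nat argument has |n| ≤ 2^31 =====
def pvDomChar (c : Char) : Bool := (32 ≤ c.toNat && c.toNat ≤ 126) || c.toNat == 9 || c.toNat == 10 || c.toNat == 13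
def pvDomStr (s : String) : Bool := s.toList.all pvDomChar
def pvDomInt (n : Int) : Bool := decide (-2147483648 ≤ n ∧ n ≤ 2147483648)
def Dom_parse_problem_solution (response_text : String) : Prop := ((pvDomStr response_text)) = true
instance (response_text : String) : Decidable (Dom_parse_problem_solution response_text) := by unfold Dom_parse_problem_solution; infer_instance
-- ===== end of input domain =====

-- B replaces A's two first-index scans plus slicing with one forward pass (find the
-- problem marker, then buffer problem lines until the solution marker); objective:
-- simpler single pass, no measured speed claim.

-- ===== PORT A =====

-- str.splitlines(keepends=True), exact on the Dom alphabet (the only line breaks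
-- there are '\n', '\r' and '\r\n'); `acc` is the current line, reversed.
def pvSplitKeep : List Char → List Char → List (List Char)
  | '\r' :: '\n' :: rest, acc => (acc.reverse ++ ['\r', '\n']) :: pvSplitKeep rest []
  | '\r' :: rest, acc => (acc.reverse ++ ['\r']) :: pvSplitKeep rest []
  | '\n' :: rest, acc => (acc.reverse ++ ['\n']) :: pvSplitKeep rest []
  | c :: rest, acc => pvSplitKeep rest (c :: acc)
  | [], acc => if acc = [] then [] else [acc.reverse]

def pvPMark : List Char := "[incomplete problem]".toList
def pvSMark : List Char := "[solution]".toList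

def parse_problem_solution (response_text : String) : Option String × Option String :=
  let lines := pvSplitKeep response_text.toList []
  let r := (PySem.List.enumerate lines).foldl
    (fun (acc : Option Int × Option Int) (it : Int × List Char) =>
      let p := if PySem.Chars.isIn pvPMark (PySem.Chars.lower it.2) && acc.1.isNone
               then some it.1 else acc.1
      let s := if PySem.Chars.isIn pvSMark (PySem.Chars.lower it.2) && acc.2.isNone
               then some it.1 else acc.2
      (p, s)) (none, none)
  match r with
  | (some p, some s) =>
    if p ≥ s then (none, none)
    else
      (some (String.ofList (PySem.Chars.strip (PySem.Chars.join []
               (PySem.List.slice lines (some (p + 1)) (some s))))),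
       some (String.ofList (PySem.Chars.strip (PySem.Chars.join []
               (PySem.List.slice lines (some (s + 1)) none)))))
  | _ => (none, none)

-- ===== PORT B =====

-- second loop of Source B: buffer problem lines until the solution marker; the rest
-- of the iterator is the solution.
def pvInProblem : List (List Char) → List (List Char) → Option String × Option String
  | [], _ => (none, none)
  | l :: rest, buf =>
    if PySem.Chars.isIn pvSMark (PySem.Chars.lower l) then
      (some (String.ofList (PySem.Chars.strip (PySem.Chars.join [] buf))),
       some (String.ofList (PySem.Chars.strip (PySem.Chars.join [] rest))))
    else pvInProblem rest (buf ++ [l])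

-- first loop of Source B: look for the problem marker, fail on an earlier solution marker.
def pvSearch : List (List Char) → Option String × Option String
  | [] => (none, none)
  | l :: rest =>
    let low := PySem.Chars.lower l
    if PySem.Chars.isIn pvSMark low then (none, none)
    else if PySem.Chars.isIn pvPMark low then pvInProblem rest []
    else pvSearch rest

def parse_problem_solution_alt (response_text : String) : Option String × Option String :=
  pvSearch (pvSplitKeep response_text.toList [])

-- ===== PRECONDITION & SPEC =====
def Spec_parse_problem_solution (response_text : String) (out : Option String × Option String) : Prop := out = parse_problem_solution_alt response_text
instance (response_text : String) (out : Option String × Option String) : Decidable (Spec_parse_problem_solution response_text out) := by unfold Spec_parse_problem_solution; infer_instance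

-- ===== CLAIM (what is proved, stated in full; the proofs are below) =====
def Claim_equal_parse_problem_solution : Prop := ∀ (response_text : String), Dom_parse_problem_solution response_text → Spec_parse_problem_solution response_text (parse_problem_solution response_text)

-- ===== LEMMAS AND PROOFS =====

def pvPb (l : List Char) : Bool := PySem.Chars.isIn pvPMark (PySem.Chars.lower l)
def pvSb (l : List Char) : Bool := PySem.Chars.isIn pvSMark (PySem.Chars.lower l)

-- A's result, rephrased with the first-index positions as naturals.
def pvACore (lines : List (List Char)) : Option String × Option String :=
  match List.findIdx? pvPb lines, List.findIdx? pvSb lines with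
  | some p, some s =>
    if s ≤ p then (none, none)
    else
      (some (String.ofList (PySem.Chars.strip (PySem.Chars.join []
               (List.take (s - (p + 1)) (List.drop (p + 1) lines))))),
       some (String.ofList (PySem.Chars.strip (PySem.Chars.join []
               (List.drop (s + 1) lines)))))
  | _, _ => (none, none)

lemma pvPb_def (l : List Char) :
    PySem.Chars.isIn pvPMark (PySem.Chars.lower l) = pvPb l := rfl
lemma pvSb_def (l : List Char) :
    PySem.Chars.isIn pvSMark (PySem.Chars.lower l) = pvSb l := rfl

lemma pvShiftb (o : Option Nat) (k : Int) :
    (Option.map (fun (i : Nat) => i + 1) o).bind (fun (a : Nat) => some (k + (a : Int))) =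
      o.bind (fun (a : Nat) => some (k + 1 + (a : Int))) := by
  cases o
  · simp
  · simp; ring

lemma pvFold_char (lines : List (List Char)) (k : Int) (acc : Option Int × Option Int) :
    (PySem.List.enumerate lines k).foldl
      (fun (acc : Option Int × Option Int) (it : Int × List Char) =>
        let p := if PySem.Chars.isIn pvPMark (PySem.Chars.lower it.2) && acc.1.isNone
                 then some it.1 else acc.1
        let s := if PySem.Chars.isIn pvSMark (PySem.Chars.lower it.2) && acc.2.isNone
                 then some it.1 else acc.2
        (p, s)) acc
    = (acc.1.or ((List.findIdx? pvPb lines).map (fun i => k + (i : Int))),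
       acc.2.or ((List.findIdx? pvSb lines).map (fun i => k + (i : Int)))) := by
  induction lines generalizing k acc with
  | nil => simp [PySem.List.enumerate]
  | cons l rest ih =>
    rw [PySem.List.enumerate_cons, List.foldl_cons, ih]
    obtain ⟨p0, s0⟩ := acc
    simp only [pvPb_def, pvSb_def, List.findIdx?_cons]
    cases hP : pvPb l <;> cases hS : pvSb l <;>
      rcases p0 with _ | pv <;> rcases s0 with _ | sv <;>
        simp [Option.or, pvShiftb]

lemma pvA_eq_aCore (lines : List (List Char)) :
    (let r := (PySem.List.enumerate lines).foldl
        (fun (acc : Option Int × Option Int) (it : Int × List Char) =>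
          let p := if PySem.Chars.isIn pvPMark (PySem.Chars.lower it.2) && acc.1.isNone
                   then some it.1 else acc.1
          let s := if PySem.Chars.isIn pvSMark (PySem.Chars.lower it.2) && acc.2.isNone
                   then some it.1 else acc.2
          (p, s)) (none, none)
     match r with
     | (some p, some s) =>
       if p ≥ s then (none, none)
       else
         (some (String.ofList (PySem.Chars.strip (PySem.Chars.join []
                  (PySem.List.slice lines (some (p + 1)) (some s))))),
          some (String.ofList (PySem.Chars.strip (PySem.Chars.join []
                  (PySem.List.slice lines (some (s + 1)) none)))))
     | _ => (none, none)) = pvACore lines := by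
  rw [pvFold_char]
  simp only [Option.or]
  rcases hF : List.findIdx? pvPb lines with _ | p <;>
    rcases hG : List.findIdx? pvSb lines with _ | s <;>
      simp [pvACore, hF, hG]
  by_cases h : s ≤ p
  · simp [h]
  · simp only [h, if_false]
    rw [show ((p : Int) + 1 : Int) = ((p + 1 : Nat) : Int) by push_cast; ring,
        show ((s : Int) + 1 : Int) = ((s + 1 : Nat) : Int) by push_cast; ring,
        PySem.List.slice_natCast,
        PySem.List.slice_from lines (by positivity),
        Int.toNat_natCast]

lemma pvInProblem_none (rest : List (List Char)) (h : List.findIdx? pvSb rest = none)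
    (buf : List (List Char)) : pvInProblem rest buf = (none, none) := by
  induction rest generalizing buf with
  | nil => simp [pvInProblem]
  | cons l rest ih =>
    rw [List.findIdx?_cons] at h
    by_cases hS : pvSb l
    · simp [hS] at h
    · simp only [hS, Bool.false_eq_true, if_false, Option.map_eq_none_iff] at h
      simp only [pvInProblem, pvSb_def, hS, Bool.false_eq_true, if_false]
      exact ih h _

lemma pvInProblem_some (rest : List (List Char)) (j : Nat)
    (h : List.findIdx? pvSb rest = some j) (buf : List (List Char)) :
    pvInProblem rest buf =
      (some (String.ofList (PySem.Chars.strip (PySem.Chars.join [] (buf ++ List.take j rest)))),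
       some (String.ofList (PySem.Chars.strip (PySem.Chars.join [] (List.drop (j + 1) rest))))) := by
  induction rest generalizing buf j with
  | nil => simp at h
  | cons l rest ih =>
    rw [List.findIdx?_cons] at h
    by_cases hS : pvSb l
    · simp only [hS, if_true] at h
      obtain rfl : j = 0 := by simpa using h.symm
      simp [pvInProblem, pvSb_def, hS]
    · simp only [hS, Bool.false_eq_true, if_false] at h
      rcases Option.map_eq_some_iff.mp h with ⟨j', hj', rfl⟩
      simp only [pvInProblem, pvSb_def, hS, Bool.false_eq_true, if_false]
      rw [ih j' hj' (buf ++ [l])]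
      simp [List.take_succ_cons, List.drop_succ_cons]

lemma pvACore_eq_search (lines : List (List Char)) : pvACore lines = pvSearch lines := by
  induction lines with
  | nil => simp [pvACore, pvSearch]
  | cons l rest ih =>
    simp only [pvSearch, pvSb_def, pvPb_def]
    by_cases hS : pvSb l
    · simp only [hS, if_true]
      simp only [pvACore, List.findIdx?_cons, hS, if_true]
      rcases hF : List.findIdx? pvPb rest with _ | i <;> by_cases hP : pvPb l <;>
        simp [hP]
    · by_cases hP : pvPb l
      · simp only [hS, Bool.false_eq_true, if_false, hP, if_true]
        rcases hG : List.findIdx? pvSb rest with _ | j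
        · rw [pvInProblem_none rest hG []]
          simp [pvACore, List.findIdx?_cons, hS, hP, hG]
        · rw [pvInProblem_some rest j hG []]
          simp only [pvACore, List.findIdx?_cons, hS, hP, hG, if_true,
            Bool.false_eq_true, if_false, Option.map_some]
          have : ¬ (j + 1 ≤ 0) := by omega
          simp [this, List.drop_succ_cons]
      · simp only [hS, hP, Bool.false_eq_true, if_false]
        rw [← ih]
        simp only [pvACore, List.findIdx?_cons, hS, hP, Bool.false_eq_true, if_false]
        rcases hF : List.findIdx? pvPb rest with _ | i <;>
          rcases hG : List.findIdx? pvSb rest with _ | j <;> simp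

-- ===== VERDICT (by name: the statement is the Claim_ definition above) =====
theorem parse_problem_solution_spec : Claim_equal_parse_problem_solution := by
  intro rt _
  unfold Spec_parse_problem_solution parse_problem_solution parse_problem_solution_alt
  rw [pvA_eq_aCore, pvACore_eq_search]
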